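-- pv_equiv track=rewrite | github.com/jaepyo/python | CosPro/cosPro2#6-3.py | solution
-- ===== SOURCE A (Python) =====
-- def solution(people):
--     #여기에 코드를 작성해주세요.
--     answer = [0 for _ in range(4)]
--
--     for i in range(len(people)): # for p in peole 로 값을 바로 가져와서 사용가능
--         if people[i] < 95:
--             answer[0] += 1
--         elif people[i] >= 95 and people[i] < 100:
--             answer[1] += 1
--         elif people[i] >= 100 and people[i] < 105:
--             answer[2] += 1
--         else:
--             answer[3] += 1
--
--     return answer
-- ===== SOURCE B (Python) =====
-- import bisect
--
-- def solution(people):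
--     s = sorted(people)
--     i1 = bisect.bisect_left(s, 95)
--     i2 = bisect.bisect_left(s, 100)
--     i3 = bisect.bisect_left(s, 105)
--     return [i1, i2 - i1, i3 - i2, len(s) - i3]
-- ===== Notes on version B (the rewrite author's own statement) =====
-- stated objective: alternative
-- what changed: Instead of bucketing each element through a four-way branch in an interpreted per-element loop, B sorts the list and reads each bucket count off as a difference of bisect_left positions of the three boundaries in the sorted list (CDF differencing).
import Mathlib
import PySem

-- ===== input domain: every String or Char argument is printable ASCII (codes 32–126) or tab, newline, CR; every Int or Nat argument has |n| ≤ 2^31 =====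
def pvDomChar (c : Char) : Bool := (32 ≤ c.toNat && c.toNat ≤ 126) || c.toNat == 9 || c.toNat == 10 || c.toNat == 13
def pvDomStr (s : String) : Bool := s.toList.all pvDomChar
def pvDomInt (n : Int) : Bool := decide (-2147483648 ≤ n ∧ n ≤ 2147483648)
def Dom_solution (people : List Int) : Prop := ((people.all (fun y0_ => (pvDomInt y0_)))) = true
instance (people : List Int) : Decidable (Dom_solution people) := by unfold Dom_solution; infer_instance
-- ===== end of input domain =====

-- B sorts the list and reads the four bucket counts off as differences of bisect_left positions of the boundaries, instead of A's per-element four-way branch (alternative algorithm).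


-- ===== PORT A =====
-- transliteration of A: answer = [0,0,0,0]; for i in range(len(people)), the if/elif chain bumps one slot
def solution (people : List Int) : List Int :=
  (PySem.List.pyRange 0 (PySem.List.len people) 1).foldl
    (fun answer i =>
      let p := PySem.List.pyGetD people i 0
      if p < 95 then answer.modify 0 (· + 1)
      else if 95 ≤ p ∧ p < 100 then answer.modify 1 (· + 1)
      else if 100 ≤ p ∧ p < 105 then answer.modify 2 (· + 1)
      else answer.modify 3 (· + 1))
    [0, 0, 0, 0]

-- ===== PORT B =====
-- transliteration of B: sort, then read the counts off as differences of bisect_left positions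
def solution_alt (people : List Int) : List Int :=
  let s := PySem.List.sorted people id
  let i1 := PySem.List.bisectLeft s (95 : Int)
  let i2 := PySem.List.bisectLeft s (100 : Int)
  let i3 := PySem.List.bisectLeft s (105 : Int)
  [(i1 : Int), (i2 : Int) - (i1 : Int), (i3 : Int) - (i2 : Int), (s.length : Int) - (i3 : Int)]

-- ===== PRECONDITION & SPEC =====
def Spec_solution (people : List Int) (out : List Int) : Prop := out = solution_alt people
instance (people : List Int) (out : List Int) : Decidable (Spec_solution people out) := by unfold Spec_solution; infer_instance

-- ===== CLAIM (what is proved, stated in full; the proofs are below) =====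
def Claim_equal_solution : Prop := ∀ (people : List Int), Dom_solution people → Spec_solution people (solution people)

-- ===== LEMMAS AND PROOFS =====

-- A's range(len(people)) loop indexes the list in order: rewrite it as a fold over the elements.
lemma solution_eq_fold (people : List Int) :
    solution people =
      people.foldl
        (fun answer p =>
          if p < 95 then answer.modify 0 (· + 1)
          else if 95 ≤ p ∧ p < 100 then answer.modify 1 (· + 1)
          else if 100 ≤ p ∧ p < 105 then answer.modify 2 (· + 1)
          else answer.modify 3 (· + 1))
        [0, 0, 0, 0] := by
  unfold solution
  have h := PySem.List.foldl_pyRange_pyGetD people (0 : Int)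
    (fun (answer : List Int) p =>
      if p < 95 then answer.modify 0 (· + 1)
      else if 95 ≤ p ∧ p < 100 then answer.modify 1 (· + 1)
      else if 100 ≤ p ∧ p < 105 then answer.modify 2 (· + 1)
      else answer.modify 3 (· + 1))
    ([0, 0, 0, 0] : List Int) (le_refl 0)
  simpa using h

-- A's fold keeps, in each slot, the start value plus the count of elements seen so far in that band.
lemma fold_counts (l : List Int) (a b c d : Int) :
    l.foldl
        (fun answer p =>
          if p < 95 then answer.modify 0 (· + 1)
          else if 95 ≤ p ∧ p < 100 then answer.modify 1 (· + 1)
          else if 100 ≤ p ∧ p < 105 then answer.modify 2 (· + 1)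
          else answer.modify 3 (· + 1))
        [a, b, c, d] =
      [a + (l.countP (fun p => decide (p < 95)) : Int),
       b + (l.countP (fun p => decide (95 ≤ p) && decide (p < 100)) : Int),
       c + (l.countP (fun p => decide (100 ≤ p) && decide (p < 105)) : Int),
       d + (l.countP (fun p => decide (105 ≤ p)) : Int)] := by
  induction l generalizing a b c d with
  | nil => simp
  | cons x xs ih =>
    rw [List.foldl_cons]
    simp only [List.countP_cons]
    by_cases h1 : x < 95
    · rw [if_pos h1]
      have e : ([a, b, c, d] : List Int).modify 0 (· + 1) = [a + 1, b, c, d] := rfl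
      rw [e, ih]
      simp only [h1, decide_true]
      have h2 : ¬ (95 ≤ x) := by omega
      simp [h2]
      omega
    · by_cases h2 : 95 ≤ x ∧ x < 100
      · rw [if_neg h1, if_pos h2]
        have e : ([a, b, c, d] : List Int).modify 1 (· + 1) = [a, b + 1, c, d] := rfl
        rw [e, ih]
        have h3 : ¬ (100 ≤ x) := by omega
        simp [h1, h2.1, h2.2, h3]
        omega
      · by_cases h3 : 100 ≤ x ∧ x < 105
        · rw [if_neg h1, if_neg h2, if_pos h3]
          have e : ([a, b, c, d] : List Int).modify 2 (· + 1) = [a, b, c + 1, d] := rfl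
          rw [e, ih]
          have h4 : ¬ (105 ≤ x) := by omega
          have h5 : ¬ (x < 100) := by omega
          simp [h1, h3.1, h3.2, h4, h5]
          omega
        · rw [if_neg h1, if_neg h2, if_neg h3]
          have e : ([a, b, c, d] : List Int).modify 3 (· + 1) = [a, b, c, d + 1] := rfl
          rw [e, ih]
          have h4 : 105 ≤ x := by omega
          have h5 : ¬ (x < 100) := by omega
          have h6 : ¬ (x < 105) := by omega
          simp [h1, h4, h5, h6]
          omega

-- On a sorted list, bisect_left x returns exactly the number of elements < x.
lemma bisectLeft_eq_countP (s : List Int) (x : Int)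
    (hs : List.Pairwise (fun a b => a ≤ b) s) :
    PySem.List.bisectLeft s x = s.countP (fun p => decide (p < x)) := by
  obtain ⟨hk, hlt, hge⟩ := PySem.List.bisectLeft_spec s x hs
  set k := PySem.List.bisectLeft s x with hkdef
  have htake : (s.take k).countP (fun p => decide (p < x)) = k := by
    rw [List.countP_eq_length.mpr, List.length_take]
    · omega
    · intro a ha
      obtain ⟨i, hi, hia⟩ := List.mem_iff_getElem.mp ha
      rw [List.length_take] at hi
      have hilt : i < s.length := by omega
      have := hlt i hilt (by omega)
      rw [List.getElem_take] at hia
      simpa [← hia] using this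
  have hdrop : (s.drop k).countP (fun p => decide (p < x)) = 0 := by
    rw [List.countP_eq_zero]
    intro a ha
    obtain ⟨i, hi, hia⟩ := List.mem_iff_getElem.mp ha
    rw [List.length_drop] at hi
    have := hge (k + i) (by omega) (by omega)
    rw [List.getElem_drop] at hia
    simp only [← hia]
    simpa using this
  have hsum : s.countP (fun p => decide (p < x)) =
      (s.take k).countP (fun p => decide (p < x)) +
        (s.drop k).countP (fun p => decide (p < x)) := by
    conv_lhs => rw [← List.take_append_drop k s]
    exact List.countP_append ..
  rw [hsum, htake, hdrop]
  omega

-- band counts as differences of cumulative (< boundary) counts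
lemma countP_band_95_100 (l : List Int) :
    l.countP (fun p => decide (95 ≤ p) && decide (p < 100)) + l.countP (fun p => decide (p < 95)) =
      l.countP (fun p => decide (p < 100)) := by
  induction l with
  | nil => simp
  | cons x xs ih =>
    simp only [List.countP_cons]
    split_ifs <;> simp_all <;> omega
  
lemma countP_band_100_105 (l : List Int) :
    l.countP (fun p => decide (100 ≤ p) && decide (p < 105)) + l.countP (fun p => decide (p < 100)) =
      l.countP (fun p => decide (p < 105)) := by
  induction l with
  | nil => simp
  | cons x xs ih =>
    simp only [List.countP_cons]
    split_ifs <;> simp_all <;> omega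

lemma countP_band_105 (l : List Int) :
    l.countP (fun p => decide (105 ≤ p)) + l.countP (fun p => decide (p < 105)) = l.length := by
  induction l with
  | nil => simp
  | cons x xs ih =>
    simp only [List.countP_cons, List.length_cons]
    split_ifs <;> simp_all <;> omega

-- ===== VERDICT (by name: the statement is the Claim_ definition above) =====
theorem solution_spec : Claim_equal_solution := by
  intro people _
  unfold Spec_solution solution_alt
  rw [solution_eq_fold, fold_counts]
  have hperm : (PySem.List.sorted people id).Perm people := PySem.List.sorted_perm people id false
  have hpair : List.Pairwise (fun a b => a ≤ b) (PySem.List.sorted people id) := by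
    simpa using PySem.List.sorted_pairwise people id
  have hc : ∀ q : Int → Bool,
      (PySem.List.sorted people id).countP q = people.countP q :=
    fun q => hperm.countP_eq q
  simp only [bisectLeft_eq_countP _ _ hpair, hc, hperm.length_eq]
  have h1 := countP_band_95_100 people
  have h2 := countP_band_100_105 people
  have h3 := countP_band_105 people
  simp only [List.cons.injEq, and_true]
  refine ⟨by omega, ?_, ?_, ?_⟩ <;> omega
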